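-- pv_equiv track=rewrite | github.com/Willmo103/wembed-core | src/wembed_core/utils/file_utils.py | process_paths_for_subdir
-- ===== SOURCE A (Python) =====
-- from typing import List, Optional
--
-- def process_paths_for_subdir(
--     files: List[str], sub_dir: Optional[str]
-- ) -> tuple[List[str], List[str]]:
--     """
--     Filters files by a subdirectory and returns both original and adjusted paths.
--
--     This function is key to making the --sub-dir feature work. It takes all the
--     files from git, finds the ones inside the target sub-directory, and then
--     creates a "virtual" view of them by stripping the sub-directory prefix.
--     We need both the original paths (for reading files) and the adjusted paths
--     (for display in the tree or list).
--
--     Args: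
--         files: List of file paths relative to the repo root.
--         sub_dir: The subdirectory to filter by, e.g., "src/app".
--
--     Returns:
--         A tuple containing:
--         - original_paths: Filtered list of original paths (e.g., ['src/app/main.py']).
--         - adjusted_paths: Paths adjusted to be relative to the sub_dir (e.g., ['main.py']).
--     """
--     if not sub_dir:
--         return files, files
--
--     # Normalize the path to use forward slashes and remove any leading/trailing ones.
--     normalized_dir = sub_dir.strip("/\\").replace("\\", "/")
--     if not normalized_dir:
--         return files, files
--
--     prefix = normalized_dir + "/"
--
--     # Find all files that start with the subdirectory path.
--     original_paths = [f for f in files if f.startswith(prefix)]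
--
--     # Create new paths with the subdirectory prefix removed.
--     adjusted_paths = [f.removeprefix(prefix) for f in original_paths]
--
--     return original_paths, adjusted_paths
-- ===== SOURCE B (Python) =====
-- from typing import List, Optional
--
-- def process_paths_for_subdir(
--     files: List[str], sub_dir: Optional[str]
-- ) -> tuple[List[str], List[str]]:
--     """Tokenization variant: compare path COMPONENTS instead of a string prefix.
--
--     Each path is split into its '/'-separated segments; a file belongs to the
--     sub-directory iff its leading segments equal the sub-directory's segments
--     (and it has at least one more segment).  The adjusted path is the rejoin of
--     the remaining segments, so no character-level prefix matching or stripping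
--     of the original string is performed at all.
--     """
--     if not sub_dir:
--         return files, files
--     normalized_dir = sub_dir.strip("/\\").replace("\\", "/")
--     if not normalized_dir:
--         return files, files
--     dparts = normalized_dir.split("/")
--     d = len(dparts)
--     original_paths: List[str] = []
--     adjusted_paths: List[str] = []
--     for f in files:
--         parts = f.split("/")
--         if len(parts) > d and parts[:d] == dparts:
--             original_paths.append(f)
--             adjusted_paths.append("/".join(parts[d:]))
--     return original_paths, adjusted_paths
-- ===== Notes on version B (the rewrite author's own statement) =====
-- stated objective: alternative
-- what changed: Instead of A's character-level prefix test (startswith) and prefix stripping (removeprefix) over the raw strings, B tokenizes every path into its '/'-separated components, selects a file by comparing its leading component list against the sub-directory's component list, and produces the adjusted path by rejoining the remaining components; the two sequential comprehensions also become one loop filling both result lists.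
import Mathlib
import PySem

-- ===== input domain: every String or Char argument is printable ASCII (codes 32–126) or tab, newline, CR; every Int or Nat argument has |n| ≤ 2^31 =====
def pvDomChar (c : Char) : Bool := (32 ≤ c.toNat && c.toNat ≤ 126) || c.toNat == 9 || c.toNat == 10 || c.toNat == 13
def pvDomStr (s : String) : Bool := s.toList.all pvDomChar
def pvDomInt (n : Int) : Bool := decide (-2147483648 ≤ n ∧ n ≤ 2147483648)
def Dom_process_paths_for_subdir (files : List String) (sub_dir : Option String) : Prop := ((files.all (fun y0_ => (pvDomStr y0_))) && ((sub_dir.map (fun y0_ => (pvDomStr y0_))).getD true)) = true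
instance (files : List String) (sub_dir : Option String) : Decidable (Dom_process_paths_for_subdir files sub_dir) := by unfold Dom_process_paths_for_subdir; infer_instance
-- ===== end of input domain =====

-- B selects and rewrites paths by comparing '/'-separated COMPONENT lists (split / list-prefix
-- comparison / rejoin) instead of A's character-level startswith/removeprefix (objective: alternative).

-- ===== PORT A =====
-- f.removeprefix(prefix) ported exactly: drop len(prefix) chars if f starts with prefix, else f unchanged
def process_paths_for_subdir (files : List String) (sub_dir : Option String) : List String × List String :=
  match sub_dir with
  | none => (files, files)
  | some sd =>
    if sd = "" then (files, files)
    else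
      let normalized_dir := PySem.Str.replace (PySem.Str.stripChars sd "/\\") "\\" "/"
      if normalized_dir = "" then (files, files)
      else
        let pre := normalized_dir ++ "/"
        let original_paths := files.filter (fun f => PySem.Str.startswith f pre)
        let adjusted_paths := original_paths.map (fun f =>
          if PySem.Str.startswith f pre then String.ofList (f.toList.drop pre.toList.length) else f)
        (original_paths, adjusted_paths)

-- ===== PORT B =====
-- s.split("/") / "/".join(xs) ported exactly via PySem.Chars.splitOn / PySem.Chars.join on the
-- character lists; parts[:d] with 0 ≤ d is List.take d.
def process_paths_for_subdir_alt (files : List String) (sub_dir : Option String) : List String × List String :=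
  match sub_dir with
  | none => (files, files)
  | some sd =>
    if sd = "" then (files, files)
    else
      let normalized_dir := PySem.Str.replace (PySem.Str.stripChars sd "/\\") "\\" "/"
      if normalized_dir = "" then (files, files)
      else
        let dparts := PySem.Chars.splitOn normalized_dir.toList ['/']
        let d := dparts.length
        files.foldl (fun (acc : List String × List String) f =>
          let parts := PySem.Chars.splitOn f.toList ['/']
          if d < parts.length ∧ parts.take d = dparts then
            (acc.1 ++ [f], acc.2 ++ [String.ofList (PySem.Chars.join ['/'] (parts.drop d))])
          else acc) ([], [])

-- ===== PRECONDITION & SPEC =====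
def Spec_process_paths_for_subdir (files : List String) (sub_dir : Option String) (out : List String × List String) : Prop := out = process_paths_for_subdir_alt files sub_dir
instance (files : List String) (sub_dir : Option String) (out : List String × List String) : Decidable (Spec_process_paths_for_subdir files sub_dir out) := by unfold Spec_process_paths_for_subdir; infer_instance

-- ===== CLAIM (what is proved, stated in full; the proofs are below) =====
def Claim_equal_process_paths_for_subdir : Prop := ∀ (files : List String) (sub_dir : Option String), Dom_process_paths_for_subdir files sub_dir → Spec_process_paths_for_subdir files sub_dir (process_paths_for_subdir files sub_dir)

-- ===== LEMMAS AND PROOFS =====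

/-- Reference single-character splitter used only in the proofs. -/
def pvSplit (c : Char) : List Char → List (List Char)
  | [] => [[]]
  | x :: r => if x = c then [] :: pvSplit c r else (pvSplit c r).modifyHead (x :: ·)

theorem pvSplit_ne_nil (c : Char) (l : List Char) : pvSplit c l ≠ [] := by
  cases l with
  | nil => simp [pvSplit]
  | cons x r =>
    simp only [pvSplit]
    split_ifs
    · simp
    · cases h : pvSplit c r with
      | nil => exact absurd h (pvSplit_ne_nil c r)
      | cons a t => simp

/-- `PySem.Chars.splitOn.go` on a single-character separator, with enough fuel. -/
theorem pv_go_eq (c : Char) (fuel : Nat) (l cur : List Char) (acc : List (List Char))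
    (h : l.length < fuel) :
    PySem.Chars.splitOn.go [c] fuel l cur acc
      = acc.reverse ++ (pvSplit c l).modifyHead (cur.reverse ++ ·) := by
  induction fuel generalizing l cur acc with
  | zero => omega
  | succ f ih =>
    cases l with
    | nil => simp [PySem.Chars.splitOn.go, pvSplit]
    | cons x r =>
      by_cases hx : x = c
      · subst hx
        have hp : List.isPrefixOf [x] (x :: r) = true := by
          simp [List.isPrefixOf]
        rw [PySem.Chars.splitOn.go]
        simp only [hp, if_true, List.length_cons, List.length_nil, Nat.zero_add,
          List.drop_succ_cons, List.drop_zero]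
        rw [ih r [] (cur.reverse :: acc) (by simpa using Nat.lt_of_succ_lt_succ h)]
        have hid : List.modifyHead (fun s : List Char => s) (pvSplit x r) = pvSplit x r := by
          cases pvSplit x r <;> rfl
        simp [pvSplit, hid]
      · have hp : List.isPrefixOf [c] (x :: r) = false := by
          simp [List.isPrefixOf]
          exact fun hh => (hx hh.symm).elim
        rw [PySem.Chars.splitOn.go]
        simp only [hp, Bool.false_eq_true, if_false]
        rw [ih r (x :: cur) acc (by simpa using Nat.lt_of_succ_lt_succ h)]
        cases hr : pvSplit c r with
        | nil => exact absurd hr (pvSplit_ne_nil c r)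
        | cons a t => simp [pvSplit, hx, hr]

theorem pv_splitOn_single (c : Char) (l : List Char) :
    PySem.Chars.splitOn l [c] = pvSplit c l := by
  have h1 := pv_go_eq c (l.length + 1) l [] [] (Nat.lt_succ_self _)
  rw [show PySem.Chars.splitOn l [c]
      = PySem.Chars.splitOn.go [c] (l.length + 1) l [] [] from rfl, h1]
  cases pvSplit c l <;> rfl

theorem pvSplit_append (c : Char) (a b : List Char) :
    pvSplit c (a ++ c :: b) = pvSplit c a ++ pvSplit c b := by
  induction a with
  | nil => simp [pvSplit]
  | cons x a ih =>
    by_cases hx : x = c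
    · simp [pvSplit, hx, ih]
    · cases ha : pvSplit c a with
      | nil => exact absurd ha (pvSplit_ne_nil c a)
      | cons p t => simp [pvSplit, hx, ih, ha]

theorem pv_join_pvSplit (c : Char) (l : List Char) :
    PySem.Chars.join [c] (pvSplit c l) = l := by
  induction l with
  | nil => simp [pvSplit, PySem.Chars.join_singleton]
  | cons x r ih =>
    by_cases hx : x = c
    · cases hr : pvSplit c r with
      | nil => exact absurd hr (pvSplit_ne_nil c r)
      | cons p t =>
        rw [hr] at ih
        simp [pvSplit, hx, hr, PySem.Chars.join_cons_cons, ih]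
    · cases hr : pvSplit c r with
      | nil => exact absurd hr (pvSplit_ne_nil c r)
      | cons p t =>
        rw [hr] at ih
        cases t with
        | nil =>
          simp [PySem.Chars.join_singleton] at ih
          simp [pvSplit, hx, hr, PySem.Chars.join_singleton, ih]
        | cons q t' =>
          simp [pvSplit, hx, hr, PySem.Chars.join_cons_cons] at ih ⊢
          simpa using ih

theorem pv_join_append (c : Char) (xs ys : List (List Char)) (hx : xs ≠ []) (hy : ys ≠ []) :
    PySem.Chars.join [c] (xs ++ ys)
      = PySem.Chars.join [c] xs ++ c :: PySem.Chars.join [c] ys := by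
  induction xs with
  | nil => exact absurd rfl hx
  | cons p t ih =>
    cases t with
    | nil =>
      cases ys with
      | nil => exact absurd rfl hy
      | cons q u => simp [PySem.Chars.join_singleton, PySem.Chars.join_cons_cons]
    | cons q u =>
      have h2 := ih (by simp)
      simp only [List.cons_append, PySem.Chars.join_cons_cons] at h2 ⊢
      simp [h2]

/-- B's component test is exactly A's string-prefix test. -/
theorem pv_cond_iff (c : Char) (N f : List Char) :
    ((pvSplit c N).length < (pvSplit c f).length ∧
      (pvSplit c f).take (pvSplit c N).length = pvSplit c N)
    ↔ (N ++ [c]) <+: f := by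
  constructor
  · rintro ⟨hlen, htake⟩
    have hsplit : pvSplit c f = pvSplit c N ++ (pvSplit c f).drop (pvSplit c N).length := by
      conv_lhs => rw [← List.take_append_drop (pvSplit c N).length (pvSplit c f)]
      rw [htake]
    have hdrop : (pvSplit c f).drop (pvSplit c N).length ≠ [] := by
      intro hnil
      rw [List.drop_eq_nil_iff] at hnil
      omega
    have hf : f = PySem.Chars.join [c] (pvSplit c f) := (pv_join_pvSplit c f).symm
    rw [hsplit, pv_join_append c _ _ (pvSplit_ne_nil c N) hdrop, pv_join_pvSplit] at hf
    exact ⟨PySem.Chars.join [c] ((pvSplit c f).drop (pvSplit c N).length), by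
      simpa using hf.symm⟩
  · rintro ⟨r, hr⟩
    have hf : f = N ++ c :: r := by simpa using hr.symm
    subst hf
    rw [pvSplit_append]
    constructor
    · have h0 : 0 < (pvSplit c r).length :=
        List.length_pos_iff.mpr (pvSplit_ne_nil c r)
      simp; omega
    · simp

/-- Under the test, B's rejoin of the remaining components is A's prefix strip. -/
theorem pv_val_eq (c : Char) (N f : List Char)
    (h : (pvSplit c N).length < (pvSplit c f).length ∧
      (pvSplit c f).take (pvSplit c N).length = pvSplit c N) :
    PySem.Chars.join [c] ((pvSplit c f).drop (pvSplit c N).length)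
      = f.drop (N.length + 1) := by
  obtain ⟨r, hr⟩ := (pv_cond_iff c N f).mp h
  have hf : f = N ++ c :: r := by simpa using hr.symm
  subst hf
  rw [pvSplit_append]
  simp [pv_join_pvSplit]

/-- A loop appending to two lists is a filter and a map over the filtered list. -/
theorem pv_fold_filter_map (p : String → Prop) [DecidablePred p] (g : String → String)
    (files : List String) (o a : List String) :
    files.foldl (fun (acc : List String × List String) f =>
      if p f then (acc.1 ++ [f], acc.2 ++ [g f]) else acc) (o, a)
    = (o ++ files.filter (fun f => decide (p f)),
       a ++ (files.filter (fun f => decide (p f))).map g) := by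
  induction files generalizing o a with
  | nil => simp
  | cons x xs ih =>
    by_cases hx : p x
    · simp [List.foldl_cons, hx, ih]
    · simp [List.foldl_cons, hx, ih]

-- ===== VERDICT (by name: the statement is the Claim_ definition above) =====
theorem process_paths_for_subdir_spec : Claim_equal_process_paths_for_subdir := by
  intro files sub_dir _
  unfold Spec_process_paths_for_subdir process_paths_for_subdir process_paths_for_subdir_alt
  match sub_dir with
  | none => rfl
  | some sd =>
    simp only
    split_ifs with h1 h2
    · rfl
    · rfl
    · set nd := PySem.Str.replace (PySem.Str.stripChars sd "/\\") "\\" "/" with hnd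
      have hfold := pv_fold_filter_map
        (fun f => (PySem.Chars.splitOn nd.toList ['/']).length
            < (PySem.Chars.splitOn f.toList ['/']).length ∧
          (PySem.Chars.splitOn f.toList ['/']).take
              (PySem.Chars.splitOn nd.toList ['/']).length
            = PySem.Chars.splitOn nd.toList ['/'])
        (fun f => String.ofList (PySem.Chars.join ['/']
          ((PySem.Chars.splitOn f.toList ['/']).drop
            (PySem.Chars.splitOn nd.toList ['/']).length)))
        files [] []
      simp only [List.nil_append] at hfold
      rw [hfold]
      have hpre : (nd ++ "/").toList = nd.toList ++ ['/'] := by simp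
      have hcond : ∀ f : String,
          (decide ((PySem.Chars.splitOn nd.toList ['/']).length
              < (PySem.Chars.splitOn f.toList ['/']).length ∧
            (PySem.Chars.splitOn f.toList ['/']).take
                (PySem.Chars.splitOn nd.toList ['/']).length
              = PySem.Chars.splitOn nd.toList ['/']))
          = PySem.Str.startswith f (nd ++ "/") := by
        intro f
        rw [Bool.eq_iff_iff, decide_eq_true_eq]
        simp only [pv_splitOn_single]
        rw [pv_cond_iff]
        rw [show PySem.Str.startswith f (nd ++ "/")
            = PySem.Chars.startswith f.toList (nd ++ "/").toList from by simp]
        rw [PySem.Chars.startswith_iff, hpre]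
      have hfilter : files.filter (fun f =>
            decide ((PySem.Chars.splitOn nd.toList ['/']).length
                < (PySem.Chars.splitOn f.toList ['/']).length ∧
              (PySem.Chars.splitOn f.toList ['/']).take
                  (PySem.Chars.splitOn nd.toList ['/']).length
                = PySem.Chars.splitOn nd.toList ['/']))
          = files.filter (fun f => PySem.Str.startswith f (nd ++ "/")) :=
        List.filter_congr fun f _ => hcond f
      rw [hfilter]
      simp only [Prod.mk.injEq, true_and]
      refine List.map_congr_left ?_
      intro f hf
      have hsw : PySem.Str.startswith f (nd ++ "/") = true := (List.mem_filter.mp hf).2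
      have hP : (pvSplit '/' nd.toList).length < (pvSplit '/' f.toList).length ∧
          (pvSplit '/' f.toList).take (pvSplit '/' nd.toList).length
            = pvSplit '/' nd.toList := by
        have := hcond f
        rw [hsw] at this
        simpa [pv_splitOn_single] using of_decide_eq_true this
      rw [hsw]
      simp only [if_true, pv_splitOn_single]
      rw [pv_val_eq '/' nd.toList f.toList hP]
      have hlen : (nd ++ "/").toList.length = nd.toList.length + 1 := by
        rw [hpre]; simp
      rw [hlen]
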